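-- pv_equiv track=rewrite | github.com/JillianQuinn/CPE-101-Projects | Word Search/wordsearch.py | transpose_string
-- ===== SOURCE A (Python) =====
-- def transpose_string(string, row_len):
--     transposed = ""
--     j = 0
--     while(j < row_len):
--         for i in range(j, len(string), row_len):
--             transposed = transposed + string[i]
--         j += 1
--     return transposed
-- ===== SOURCE B (Python) =====
-- def transpose_string(string, row_len):
--     if row_len <= 0:
--         return ""
--     rows = [string[k:k + row_len] for k in range(0, len(string), row_len)]
--     width = len(rows[0]) if rows else 0
--     return "".join(r[c] for c in range(width) for r in rows if c < len(r))
-- ===== Notes on version B (the rewrite author's own statement) =====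
-- stated objective: alternative
-- what changed: B chunks the string into rows of length row_len and walks that 2D row structure column by column joining the characters at the end, instead of A's stride-indexing of the flat string with nested index loops and per-character string concatenation.
import Mathlib
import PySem

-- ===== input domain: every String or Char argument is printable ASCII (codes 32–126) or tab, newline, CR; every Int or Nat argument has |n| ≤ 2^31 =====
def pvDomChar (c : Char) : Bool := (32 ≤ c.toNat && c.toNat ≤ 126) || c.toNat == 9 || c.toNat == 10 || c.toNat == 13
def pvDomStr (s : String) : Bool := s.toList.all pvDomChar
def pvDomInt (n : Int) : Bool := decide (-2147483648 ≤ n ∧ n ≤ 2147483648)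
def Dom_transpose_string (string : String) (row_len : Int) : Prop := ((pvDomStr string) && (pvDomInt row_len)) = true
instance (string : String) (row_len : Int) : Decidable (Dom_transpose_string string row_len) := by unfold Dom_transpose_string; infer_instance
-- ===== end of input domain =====

-- B chunks the string into rows of length row_len and walks that 2D structure column by column,
-- instead of A's stride-indexing of the flat string; alternative decomposition, same cost.


-- ===== PORT A =====
-- while j < row_len: for i in range(j, len(string), row_len): transposed = transposed + string[i]
def transpose_string (string : String) (row_len : Int) : String :=
  let cs := string.toList
  String.ofList
    ((PySem.List.pyRange 0 row_len 1).foldl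
      (fun acc j =>
        (PySem.List.pyRange j (cs.length : Int) row_len).foldl
          (fun acc2 i =>
            acc2 ++ (match PySem.List.pyGet? cs i with
                     | some c => [c]
                     | none => []))
          acc)
      [])

-- ===== PORT B =====
-- if row_len <= 0: return ""; rows = [string[k:k+row_len] for k in range(0, len(string), row_len)];
-- width = len(rows[0]) if rows else 0; join r[c] for c in range(width) for r in rows if c < len(r)
def transpose_string_alt (string : String) (row_len : Int) : String :=
  if row_len ≤ 0 then "" else
    let cs := string.toList
    let rows := (PySem.List.pyRange 0 (cs.length : Int) row_len).map
        (fun k => PySem.List.slice cs (some k) (some (k + row_len)))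
    let width := match rows with | [] => 0 | r :: _ => r.length
    String.ofList
      ((List.range width).flatMap
        (fun c => rows.flatMap (fun r => if h : c < r.length then [r[c]] else [])))

-- ===== PRECONDITION & SPEC =====
def Spec_transpose_string (string : String) (row_len : Int) (out : String) : Prop := out = transpose_string_alt string row_len
instance (string : String) (row_len : Int) (out : String) : Decidable (Spec_transpose_string string row_len out) := by unfold Spec_transpose_string; infer_instance

-- ===== CLAIM (what is proved, stated in full; the proofs are below) =====
def Claim_equal_transpose_string : Prop := ∀ (string : String) (row_len : Int), Dom_transpose_string string row_len → Spec_transpose_string string row_len (transpose_string string row_len)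

-- ===== LEMMAS AND PROOFS =====

-- k < ceil(m/l) ↔ l*k < m   (Nat ceiling division written (m + l - 1) / l)
theorem pv_lt_ceil_iff (m l k : Nat) (hl : 0 < l) : k < (m + l - 1) / l ↔ l * k < m := by
  rw [show (k < (m + l - 1) / l ↔ k + 1 ≤ (m + l - 1) / l) from Iff.rfl,
      Nat.le_div_iff_mul_le hl, Nat.succ_mul, Nat.mul_comm l k]
  omega

-- the Int-side count of pyRange_of_pos is the Nat ceiling count
theorem pv_cnt_cast (n j l : Nat) (hl : 0 < l) :
    (if (j : Int) < (n : Int) then (((n : Int) - (j : Int) + (l : Int) - 1) / (l : Int)).toNat else 0)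
      = (n - j + l - 1) / l := by
  split
  · next h =>
    have hj : j < n := by exact_mod_cast h
    rw [show ((n : Int) - (j : Int) + (l : Int) - 1) = ((n - j + l - 1 : Nat) : Int) by omega]
    exact Nat.add_zero _
  · next h =>
    have hj : n ≤ j := by exact_mod_cast not_lt.mp h
    rw [show n - j + l - 1 = l - 1 from by omega]
    exact (Nat.div_eq_of_lt (by omega)).symm

-- a flatMap over range N of a guard that holds exactly below C ≤ N is a map over range C
theorem pv_flatMap_range_ite {α : Type} (f : Nat → α) (N C : Nat) (hCN : C ≤ N)
    (P : Nat → Prop) [DecidablePred P] (hP : ∀ r, P r ↔ r < C) :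
    (List.range N).flatMap (fun r => if P r then [f r] else []) = (List.range C).map f := by
  have key : (List.range N).flatMap (fun r => if P r then [f r] else [])
      = (List.range N).flatMap (fun r => if r < C then [f r] else []) :=
    List.flatMap_congr (fun r _ => by simp [hP])
  rw [key]; clear key hP
  induction N with
  | zero => interval_cases C; simp
  | succ N ih =>
    rw [List.range_succ, List.flatMap_append]
    rcases Nat.lt_or_ge C (N + 1) with hlt | hge
    · rw [ih (by omega)]
      simp [show ¬ (N < C) from by omega]
    · have hC : C = N + 1 := by omega
      subst hC
      have h1 : (List.range N).flatMap (fun r => if r < N + 1 then [f r] else [])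
          = (List.range N).map f := by
        have hc := List.flatMap_congr (l := List.range N)
          (f := fun r => if r < N + 1 then [f r] else []) (g := fun r => [f r])
          (fun r hr => by rw [List.mem_range] at hr; simp [show r < N + 1 from by omega])
        rw [hc, ← List.map_eq_flatMap]
      rw [h1, List.range_succ, List.map_append]
      simp

-- trailing empty blocks can be dropped from a flatMap over a range
theorem pv_flatMap_range_trunc {α : Type} (G : Nat → List α) (N C : Nat) (hCN : C ≤ N)
    (h : ∀ j, C ≤ j → j < N → G j = []) :
    (List.range N).flatMap G = (List.range C).flatMap G := by
  induction N with
  | zero => interval_cases C; rfl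
  | succ N ih =>
    rcases Nat.lt_or_ge C (N + 1) with hlt | hge
    · rw [List.range_succ, List.flatMap_append, ih (by omega) (fun j hj hj' => h j hj (by omega))]
      simp [h N (by omega) (by omega)]
    · have : C = N + 1 := by omega
      subst this; rfl

-- A's inner stride loop, as a map over the Nat ceiling count
theorem pv_inner (cs : List Char) (l j : Nat) (hl : 0 < l) :
    (PySem.List.pyRange (j : Int) ((cs.length : Nat) : Int) (l : Int)).flatMap
        (fun i => (match PySem.List.pyGet? cs i with | some c => [c] | none => []))
      = (List.range ((cs.length - j + l - 1) / l)).map (fun k => cs.getD (l * k + j) 'a') := by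
  rw [PySem.List.pyRange_of_pos _ _ (by exact_mod_cast hl), List.flatMap_map,
      pv_cnt_cast cs.length j l hl]
  have key : ∀ k ∈ List.range ((cs.length - j + l - 1) / l),
      (match PySem.List.pyGet? cs ((j : Int) + (l : Int) * (k : Int)) with
       | some c => [c] | none => []) = [cs.getD (l * k + j) 'a'] := by
    intro k hk
    rw [List.mem_range, pv_lt_ceil_iff _ _ _ hl] at hk
    have hidx : l * k + j < cs.length := by omega
    rw [show ((j : Int) + (l : Int) * (k : Int)) = ((l * k + j : Nat) : Int) by push_cast; ring,
        PySem.List.pyGet?_natCast, List.getElem?_eq_getElem hidx, List.getD_eq_getElem _ _ hidx]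
  rw [List.flatMap_congr key, ← List.map_eq_flatMap]

-- ===== VERDICT (by name: the statement is the Claim_ definition above) =====
theorem transpose_string_spec : Claim_equal_transpose_string := by
  intro s L _
  unfold Spec_transpose_string
  simp only [transpose_string, transpose_string_alt]
  by_cases hL : L ≤ 0
  · rw [if_pos hL, PySem.List.pyRange_one_eq_nil hL]
    rfl
  · rw [not_le] at hL
    rw [if_neg (not_le.mpr hL)]
    set cs := s.toList with hcs
    set l := L.toNat with hldef
    have hl : 0 < l := by omega
    have hcast : (l : Int) = L := by omega
    set n := cs.length with hn
    -- A's nested loop as a flatMap over column index j of stride reads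
    have hA : ((PySem.List.pyRange 0 L 1).foldl
        (fun acc j =>
          (PySem.List.pyRange j (n : Int) L).foldl
            (fun acc2 i =>
              acc2 ++ (match PySem.List.pyGet? cs i with
                       | some c => [c]
                       | none => []))
            acc)
        [])
        = (List.range l).flatMap
            (fun j => (List.range ((n - j + l - 1) / l)).map (fun k => cs.getD (l * k + j) 'a')) := by
      simp only [PySem.List.foldl_append_eq_flatMap, List.nil_append]
      rw [PySem.List.pyRange_one 0 L]
      rw [show (L - 0).toNat = l from by omega]
      rw [List.flatMap_map]
      apply List.flatMap_congr
      intro j hj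
      rw [show ((0 : Int) + (j : Int)) = ((j : Nat) : Int) from by push_cast; ring, ← hcast, hn]
      exact pv_inner cs l j hl
    rw [hA]
    -- B's rows are take/drop chunks
    have hrows : (PySem.List.pyRange 0 (n : Int) L).map
          (fun k => PySem.List.slice cs (some k) (some (k + L)))
        = (List.range ((n + l - 1) / l)).map (fun r => (cs.drop (l * r)).take l) := by
      rw [PySem.List.pyRange_of_pos _ _ hL, List.map_map]
      have hcnt0 : (if (0 : Int) < (n : Int) then (((n : Int) - 0 + L - 1) / L).toNat else 0)
          = (n + l - 1) / l := by
        rw [← hcast]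
        have h0 := pv_cnt_cast n 0 l hl
        simpa using h0
      rw [hcnt0]
      apply List.map_congr_left
      intro r _
      show PySem.List.slice cs (some (0 + L * (r : Int))) (some (0 + L * (r : Int) + L))
          = (cs.drop (l * r)).take l
      rw [show ((0 : Int) + L * (r : Int)) = ((l * r : Nat) : Int) from by rw [← hcast]; push_cast; ring]
      rw [show ((l * r : Nat) : Int) + L = ((l * r : Nat) : Int) + ((l : Nat) : Int) from by rw [hcast]]
      exact PySem.List.slice_natCast_add cs (l * r) l
    rw [hrows]
    -- the first row's length is min l n
    have hwidth : (match (List.range ((n + l - 1) / l)).map (fun r => (cs.drop (l * r)).take l) with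
        | [] => 0 | r :: _ => r.length) = min l n := by
      by_cases hn0 : n = 0
      · rw [show (n + l - 1) / l = 0 from by rw [show n + l - 1 = l - 1 from by omega]; exact Nat.div_eq_of_lt (by omega)]
        simp [hn0]
      · obtain ⟨m, hm⟩ : ∃ m, (n + l - 1) / l = m + 1 := by
          have h1 : 1 ≤ (n + l - 1) / l := by
            rw [Nat.le_div_iff_mul_le hl]; omega
          exact ⟨(n + l - 1) / l - 1, by omega⟩
        rw [hm, List.range_succ_eq_map]
        simp [← hn]
    rw [hwidth]
    congr 1
    -- drop A's empty trailing columns (j with n ≤ j < l contribute nothing)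
    rw [pv_flatMap_range_trunc _ l (min l n) (Nat.min_le_left l n)
      (by
        intro j hj hj'
        have hjn : n ≤ j := by omega
        rw [show n - j + l - 1 = l - 1 from by omega, Nat.div_eq_of_lt (by omega)]
        simp)]
    -- columns agree pointwise
    apply List.flatMap_congr
    intro c hc
    rw [List.mem_range] at hc
    have hcl : c < l := by omega
    have hcn : c < n := by omega
    rw [List.flatMap_map]
    have hguard : ∀ r ∈ List.range ((n + l - 1) / l),
        (if h : c < ((cs.drop (l * r)).take l).length then [((cs.drop (l * r)).take l)[c]] else [])
          = (if l * r + c < n then [cs.getD (l * r + c) 'a'] else []) := by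
      intro r _
      have hlen : ((cs.drop (l * r)).take l).length = min l (n - l * r) := by
        simp [← hn]
      by_cases hcond : l * r + c < n
      · have h1 : c < ((cs.drop (l * r)).take l).length := by rw [hlen]; omega
        rw [dif_pos h1, if_pos hcond]
        have hidx : l * r + c < n := hcond
        congr 1
        rw [List.getElem_take, List.getElem_drop, List.getD_eq_getElem _ _ (by omega : l * r + c < cs.length)]
      · have h1 : ¬ c < ((cs.drop (l * r)).take l).length := by rw [hlen]; omega
        rw [dif_neg h1, if_neg hcond]
    rw [List.flatMap_congr hguard]
    exact (pv_flatMap_range_ite (fun k => cs.getD (l * k + c) 'a') ((n + l - 1) / l)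
      ((n - c + l - 1) / l)
      (Nat.div_le_div_right (by omega))
      (fun r => l * r + c < n)
      (fun r => by
        rw [pv_lt_ceil_iff (n - c) l r hl]
        omega)).symm
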